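-- pv_equiv track=rewrite | github.com/rcs333/VAPiD | ClinVirusSeq.py | build_num_arrays
-- ===== SOURCE A (Python) =====
-- def build_num_arrays(our_seq, ref_seq):
--     ref_count = 0
--     our_count = 0
--     ref_num_array = []
--     our_num_array = []
--
--     for x in range(0, len(ref_seq)):
--         if ref_seq[x] != '-':
--             ref_count += 1
--             ref_num_array.append(ref_count)
--         else:
--             ref_num_array.append(-1)
--
--         if our_seq[x] != '-':
--             our_count += 1
--             our_num_array.append(our_count)
--         else:
--             our_num_array.append(-1)
--
--     return our_num_array, ref_num_array
-- ===== SOURCE B (Python) =====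
-- def build_num_arrays(our_seq, ref_seq):
--     # Closed form: a non-gap position x is the (x+1 - gaps_before_or_at_x)-th
--     # non-gap character, so no running counters are needed at all.
--     def num(seq):
--         return [-1 if seq[x] == '-' else x + 1 - seq.count('-', 0, x + 1)
--                 for x in range(len(ref_seq))]
--     return num(our_seq), num(ref_seq)
-- ===== Notes on version B (the rewrite author's own statement) =====
-- stated objective: alternative
-- what changed: Replaces A's sequential numbering with two running counters by a stateless per-position closed form: each non-gap position x gets x+1 minus the count of '-' in seq[:x+1] (str.count), with no accumulator carried between positions.
import Mathlib
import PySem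

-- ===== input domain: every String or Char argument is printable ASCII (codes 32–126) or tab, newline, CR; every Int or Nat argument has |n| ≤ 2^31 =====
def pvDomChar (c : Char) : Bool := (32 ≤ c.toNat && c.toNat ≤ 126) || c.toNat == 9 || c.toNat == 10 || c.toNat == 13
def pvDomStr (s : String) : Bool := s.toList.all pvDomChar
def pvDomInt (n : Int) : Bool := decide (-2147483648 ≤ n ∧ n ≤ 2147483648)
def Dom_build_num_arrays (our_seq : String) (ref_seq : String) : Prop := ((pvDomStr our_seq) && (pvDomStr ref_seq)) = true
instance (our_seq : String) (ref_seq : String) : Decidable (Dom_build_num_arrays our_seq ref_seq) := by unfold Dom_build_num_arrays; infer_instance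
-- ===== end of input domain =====

-- B replaces A's sequential numbering (two running counters) by a stateless per-position
-- closed form: a non-gap position x gets x+1 minus the number of '-' in seq[:x+1].

-- ===== PORT A =====
-- the body of A's for-loop: state is (ref_count, our_count, ref_num_array, our_num_array)
def stepA (os rs : List Char) (st : Int × Int × List Int × List Int) (x : Int) :
    Int × Int × List Int × List Int :=
  let rc := st.1; let oc := st.2.1; let ra := st.2.2.1; let oa := st.2.2.2
  let (rc, ra) := if PySem.List.pyGetD rs x ' ' ≠ '-' then (rc + 1, ra ++ [rc + 1]) else (rc, ra ++ [(-1 : Int)])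
  let (oc, oa) := if PySem.List.pyGetD os x ' ' ≠ '-' then (oc + 1, oa ++ [oc + 1]) else (oc, oa ++ [(-1 : Int)])
  (rc, oc, ra, oa)

def build_num_arrays (our_seq : String) (ref_seq : String) : List Int × List Int :=
  let os := our_seq.toList
  let rs := ref_seq.toList
  let st := (PySem.List.pyRange 0 (rs.length : Int) 1).foldl (stepA os rs) (0, 0, [], [])
  (st.2.2.2, st.2.2.1)

-- ===== PORT B =====
-- the comprehension of Source B's num(): seq.count('-', 0, x+1) is the '-'-count of the
-- slice seq[0:x+1], which for these nonneg bounds is exactly (s.take (x+1)).count '-'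
def numArrayAlt (s : List Char) (n : Nat) : List Int :=
  (List.range n).map (fun x =>
    if s.getD x ' ' = '-' then (-1 : Int)
    else ((x : Int) + 1) - ((s.take (x + 1)).count '-' : Int))

def build_num_arrays_alt (our_seq : String) (ref_seq : String) : List Int × List Int :=
  (numArrayAlt our_seq.toList ref_seq.toList.length,
   numArrayAlt ref_seq.toList ref_seq.toList.length)

-- ===== PRECONDITION & SPEC =====
-- Pre_ excludes exactly the inputs where Python A raises IndexError: our_seq shorter than
-- ref_seq (the loop indexes our_seq[x] for every x < len(ref_seq)); B raises there too.
def Pre_build_num_arrays (our_seq : String) (ref_seq : String) : Prop :=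
  ref_seq.toList.length ≤ our_seq.toList.length
instance (our_seq : String) (ref_seq : String) : Decidable (Pre_build_num_arrays our_seq ref_seq) := by
  unfold Pre_build_num_arrays; infer_instance

def pvWitness_build_num_arrays : String × String := ("AC-GT", "A-CGT")

def Spec_build_num_arrays (our_seq : String) (ref_seq : String) (out : List Int × List Int) : Prop := out = build_num_arrays_alt our_seq ref_seq
instance (our_seq : String) (ref_seq : String) (out : List Int × List Int) : Decidable (Spec_build_num_arrays our_seq ref_seq out) := by unfold Spec_build_num_arrays; infer_instance

-- ===== CLAIM (what is proved, stated in full; the proofs are below) =====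
def Claim_equal_build_num_arrays : Prop := ∀ (our_seq : String) (ref_seq : String), Dom_build_num_arrays our_seq ref_seq → Pre_build_num_arrays our_seq ref_seq → Spec_build_num_arrays our_seq ref_seq (build_num_arrays our_seq ref_seq)

-- ===== LEMMAS AND PROOFS =====

-- running non-gap count over the first n characters
def cnt (s : List Char) (n : Nat) : Nat := (s.take n).countP (fun c => c != '-')

-- closed form of A's loop result
def specArr (s : List Char) (n : Nat) : List Int :=
  (List.range n).map (fun i => if s.getD i ' ' = '-' then (-1 : Int) else (cnt s (i + 1) : Int))

lemma cnt_succ (s : List Char) (n : Nat) (h : n < s.length) :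
    cnt s (n + 1) = cnt s n + (if s.getD n ' ' = '-' then 0 else 1) := by
  unfold cnt
  rw [List.take_add_one, List.countP_append]
  have : s[n]? = some s[n] := List.getElem?_eq_getElem h
  simp [this, List.getD, List.countP_cons]

lemma specArr_succ (s : List Char) (n : Nat) :
    specArr s (n + 1) = specArr s n ++
      [if s.getD n ' ' = '-' then (-1 : Int) else (cnt s (n + 1) : Int)] := by
  unfold specArr
  rw [List.range_succ, List.map_append]
  rfl

lemma A_loop (os rs : List Char) (n : Nat) (hr : n ≤ rs.length) (ho : n ≤ os.length) :
    (PySem.List.pyRange 0 (n : Int) 1).foldl (stepA os rs) (0, 0, [], []) =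
      ((cnt rs n : Int), (cnt os n : Int), specArr rs n, specArr os n) := by
  induction n with
  | zero => simp [cnt, specArr, PySem.List.pyRange]
  | succ n ih =>
    have hr' : n < rs.length := by omega
    have ho' : n < os.length := by omega
    have hrange : PySem.List.pyRange 0 ((n : Int) + 1) 1 =
        PySem.List.pyRange 0 (n : Int) 1 ++ [(n : Int)] :=
      PySem.List.pyRange_one_succ_right (by exact_mod_cast Nat.zero_le n)
    have hcast : ((n + 1 : Nat) : Int) = (n : Int) + 1 := by push_cast; ring_nf
    rw [hcast, hrange, List.foldl_append, ih (by omega) (by omega)]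
    simp only [List.foldl_cons, List.foldl_nil, stepA]
    rw [PySem.List.pyGetD_natCast, PySem.List.pyGetD_natCast]
    rw [specArr_succ rs n, specArr_succ os n,
        cnt_succ rs n hr', cnt_succ os n ho']
    by_cases h1 : rs.getD n ' ' = '-' <;> by_cases h2 : os.getD n ' ' = '-' <;>
      simp only [List.getD] at h1 h2 <;>
      simp [List.getD, h1, h2]

-- the closed form equals the running count: nongaps + gaps in a prefix = prefix length
lemma closed_form (s : List Char) (i : Nat) (h : i < s.length) :
    ((i : Int) + 1) - ((s.take (i + 1)).count '-' : Int) = (cnt s (i + 1) : Int) := by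
  have hlen : (s.take (i + 1)).length = i + 1 := by
    rw [List.length_take]; omega
  have hsplit : (s.take (i + 1)).countP (fun c => c != '-') +
      (s.take (i + 1)).countP (fun c => c == '-') = i + 1 := by
    have h0 := List.length_eq_countP_add_countP (l := s.take (i + 1)) (p := fun c => c == '-')
    rw [hlen] at h0
    have hswap : (s.take (i + 1)).countP (fun a => decide ¬(a == '-') = true) =
        (s.take (i + 1)).countP (fun c => c != '-') :=
      List.countP_congr (by intro c _; simp [bne])
    omega
  unfold cnt
  rw [List.count]
  omega

lemma B_eq (s : List Char) (n : Nat) (h : n ≤ s.length) : numArrayAlt s n = specArr s n := by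
  unfold numArrayAlt specArr
  apply List.map_congr_left
  intro i hi
  have hi' : i < s.length := lt_of_lt_of_le (List.mem_range.mp hi) h
  simp only [List.getD] at *
  by_cases hc : s[i]?.getD ' ' = '-'
  · simp [hc]
  · simp only [hc, if_false]
    simpa [List.getD] using closed_form s i hi'

-- ===== VERDICT (by name: the statement is the Claim_ definition above) =====
theorem build_num_arrays_spec : Claim_equal_build_num_arrays := by
  intro our_seq ref_seq _ hpre
  unfold Spec_build_num_arrays build_num_arrays build_num_arrays_alt
  dsimp only
  have hA := A_loop our_seq.toList ref_seq.toList ref_seq.toList.length (le_refl _) hpre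
  rw [hA]
  rw [B_eq our_seq.toList ref_seq.toList.length hpre,
      B_eq ref_seq.toList ref_seq.toList.length (le_refl _)]
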